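-- pv_equiv track=rewrite | github.com/Z3ro0o0/gno_backendrail | app/trucking_upload_view.py | clean_load_value
-- ===== SOURCE A (Python) =====
-- def clean_load_value(load_value, valid_load_types=None):
--     """Enhanced cleaning for load values - matches against LoadType model"""
--     if not load_value:
--         return None
--
--     load_clean = str(load_value).strip()
--
--     # If valid_load_types is provided, find the best match from database
--     if valid_load_types is not None:
--         load_lower = load_clean.lower()
--         # Try exact match first
--         for load_type in valid_load_types:
--             if load_type.lower() == load_lower:
--                 return load_type  # Return the exact name from database
--
--         # Try partial match (in case there are extra words)
--         for load_type in valid_load_types: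
--             if load_type.lower() in load_lower or load_lower in load_type.lower():
--                 return load_type
--
--         return None
--
--     # Fallback: Special cases (for backward compatibility)
--     special_cases = {
--         'backload cdo': 'Backload CDO',
--         'rh holcim': 'RH Holcim',
--         'strike': 'Strike',
--         'cement': 'Cement',
--         'cemento': 'Cemento'
--     }
--
--     # First check if it's a direct match
--     if load_clean.lower() in special_cases:
--         return special_cases[load_clean.lower()]
--
--     # For case-sensitive variations, try to find a match
--     for key, value in special_cases.items():
--         if load_clean.lower() == key.lower():
--             return value
--
--     # If not a direct match, return None
--     return None
-- ===== SOURCE B (Python) =====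
-- # B: single fused scan (exact wins immediately, first partial recorded) + dict.get fallback.
-- def clean_load_value(load_value, valid_load_types=None):
--     if not load_value:
--         return None
--     load_clean = str(load_value).strip()
--     if valid_load_types is not None:
--         load_lower = load_clean.lower()
--         first_partial = None
--         for load_type in valid_load_types:
--             lt = load_type.lower()
--             if lt == load_lower:
--                 return load_type
--             if first_partial is None and (lt in load_lower or load_lower in lt):
--                 first_partial = load_type
--         return first_partial
--     special_cases = {
--         'backload cdo': 'Backload CDO',
--         'rh holcim': 'RH Holcim',
--         'strike': 'Strike',
--         'cement': 'Cement',
--         'cemento': 'Cemento'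
--     }
--     return special_cases.get(load_clean.lower())
-- ===== Notes on version B (the rewrite author's own statement) =====
-- stated objective: simpler
-- what changed: The two sequential scans over valid_load_types (exact-match pass, then partial-match pass) are fused into one pass that returns immediately on an exact match and records the first partial match, and the special_cases fallback (membership test plus a redundant case-insensitive loop over already-lowercase keys) collapses to a single dict.get.
import Mathlib
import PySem

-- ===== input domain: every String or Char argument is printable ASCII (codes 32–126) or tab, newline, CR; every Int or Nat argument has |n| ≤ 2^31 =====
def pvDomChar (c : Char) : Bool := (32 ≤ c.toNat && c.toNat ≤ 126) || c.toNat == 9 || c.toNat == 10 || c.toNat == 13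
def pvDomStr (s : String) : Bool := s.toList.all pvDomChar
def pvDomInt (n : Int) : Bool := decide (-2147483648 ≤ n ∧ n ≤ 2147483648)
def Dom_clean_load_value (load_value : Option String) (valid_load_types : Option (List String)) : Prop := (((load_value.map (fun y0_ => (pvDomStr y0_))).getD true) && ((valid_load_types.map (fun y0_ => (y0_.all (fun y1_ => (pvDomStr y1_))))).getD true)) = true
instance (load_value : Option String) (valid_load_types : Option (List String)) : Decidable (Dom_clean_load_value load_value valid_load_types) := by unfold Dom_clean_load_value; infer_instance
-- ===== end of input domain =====

-- B fuses A's two scans over valid_load_types into one pass (exact match returns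
-- immediately, first partial match is recorded) and replaces the special-cases
-- fallback by a single dict lookup; objective: simpler. Proved equal on all inputs.

-- ===== PORT A =====
def pvSpecialCases : PySem.Dict String String :=
  PySem.Dict.ofList [("backload cdo", "Backload CDO"), ("rh holcim", "RH Holcim"),
    ("strike", "Strike"), ("cement", "Cement"), ("cemento", "Cemento")]

def clean_load_value (load_value : Option String) (valid_load_types : Option (List String)) : Option String :=
  match load_value with
  | none => none
  | some s =>
    if s = "" then none else
    let load_clean := PySem.Str.strip s
    match valid_load_types with
    | some vts =>
      let load_lower := PySem.Str.lower load_clean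
      -- first loop: exact match, early return
      match vts.find? (fun lt => PySem.Str.lower lt == load_lower) with
      | some lt => some lt
      | none =>
        -- second loop: partial match, early return
        match vts.find? (fun lt => PySem.Str.isIn (PySem.Str.lower lt) load_lower
                                   || PySem.Str.isIn load_lower (PySem.Str.lower lt)) with
        | some lt => some lt
        | none => none
    | none =>
      let ll := PySem.Str.lower load_clean
      if pvSpecialCases.contains ll then pvSpecialCases.get? ll
      else
        -- loop over items comparing lowered keys, early return
        match pvSpecialCases.items.find? (fun kv => ll == PySem.Str.lower kv.1) with
        | some kv => some kv.2
        | none => none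


-- ===== PORT B =====
-- B: one pass keeping first_partial; exact match returns immediately.
def pvAltScan (load_lower : String) : List String → Option String → Option String
  | [], fp => fp
  | load_type :: rest, fp =>
    let lt := PySem.Str.lower load_type
    if lt == load_lower then some load_type
    else pvAltScan load_lower rest
      (if fp.isNone && (PySem.Str.isIn lt load_lower || PySem.Str.isIn load_lower lt)
       then some load_type else fp)

def pvSpecialCasesB : PySem.Dict String String :=
  PySem.Dict.ofList [("backload cdo", "Backload CDO"), ("rh holcim", "RH Holcim"),
    ("strike", "Strike"), ("cement", "Cement"), ("cemento", "Cemento")]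

def clean_load_value_alt (load_value : Option String) (valid_load_types : Option (List String)) : Option String :=
  match load_value with
  | none => none
  | some s =>
    if s = "" then none else
    let load_clean := PySem.Str.strip s
    match valid_load_types with
    | some vts => pvAltScan (PySem.Str.lower load_clean) vts none
    | none => pvSpecialCasesB.get? (PySem.Str.lower load_clean)


-- ===== PRECONDITION & SPEC =====
def Spec_clean_load_value (load_value : Option String) (valid_load_types : Option (List String)) (out : Option String) : Prop := out = clean_load_value_alt load_value valid_load_types
instance (load_value : Option String) (valid_load_types : Option (List String)) (out : Option String) : Decidable (Spec_clean_load_value load_value valid_load_types out) := by unfold Spec_clean_load_value; infer_instance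

-- ===== CLAIM (what is proved, stated in full; the proofs are below) =====
def Claim_equal_clean_load_value : Prop := ∀ (load_value : Option String) (valid_load_types : Option (List String)), Dom_clean_load_value load_value valid_load_types → Spec_clean_load_value load_value valid_load_types (clean_load_value load_value valid_load_types)

-- ===== LEMMAS AND PROOFS =====
theorem pvAltScan_eq (ll : String) (xs : List String) (fp : Option String) :
    pvAltScan ll xs fp =
      match xs.find? (fun lt => PySem.Str.lower lt == ll) with
      | some lt => some lt
      | none =>
        match fp with
        | some v => some v
        | none =>
          match xs.find? (fun lt => PySem.Str.isIn (PySem.Str.lower lt) ll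
                                    || PySem.Str.isIn ll (PySem.Str.lower lt)) with
          | some lt => some lt
          | none => none := by
  induction xs generalizing fp with
  | nil => cases fp <;> simp [pvAltScan]
  | cons x rest ih =>
    rw [pvAltScan, List.find?_cons, List.find?_cons]
    cases hx : (PySem.Str.lower x == ll) with
    | true => simp
    | false =>
      simp only [Bool.false_eq_true, if_false]
      rw [ih]
      cases fp with
      | some v => simp
      | none =>
        cases hp : (PySem.Str.isIn (PySem.Str.lower x) ll || PySem.Str.isIn ll (PySem.Str.lower x)) with
        | true => simp
        | false => simp

theorem pvFallback_eq (ll : String) :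
    (if pvSpecialCases.contains ll then pvSpecialCases.get? ll
     else
       match pvSpecialCases.items.find? (fun kv => ll == PySem.Str.lower kv.1) with
       | some kv => some kv.2
       | none => none) = pvSpecialCasesB.get? ll := by
  cases h : pvSpecialCases.contains ll with
  | true => simp [h, show pvSpecialCasesB = pvSpecialCases from rfl]
  | false =>
    have hk : pvSpecialCases.keys = ["backload cdo", "rh holcim", "strike", "cement", "cemento"] := by
      decide
    have hm : ¬ ll ∈ pvSpecialCases.keys := by
      rw [← PySem.Dict.contains_iff_mem_keys, h]; exact Bool.false_ne_true
    rw [hk] at hm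
    simp only [List.mem_cons, List.not_mem_nil, not_or, or_false] at hm
    obtain ⟨n1, n2, n3, n4, n5⟩ := hm
    have hi : pvSpecialCases.items = [("backload cdo", "Backload CDO"), ("rh holcim", "RH Holcim"),
        ("strike", "Strike"), ("cement", "Cement"), ("cemento", "Cemento")] := by decide
    have hB : pvSpecialCasesB = pvSpecialCases := rfl
    rw [hB]
    have hg : pvSpecialCases.get? ll = none := by
      rw [PySem.Dict.get?_eq_none_iff_not_mem_keys, hk]
      simp [n1, n2, n3, n4, n5]
    have h1 : PySem.Str.lower "backload cdo" = "backload cdo" := by decide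
    have h2 : PySem.Str.lower "rh holcim" = "rh holcim" := by decide
    have h3 : PySem.Str.lower "strike" = "strike" := by decide
    have h4 : PySem.Str.lower "cement" = "cement" := by decide
    have h5 : PySem.Str.lower "cemento" = "cemento" := by decide
    have b1 : (ll == "backload cdo") = false := by simp [n1]
    have b2 : (ll == "rh holcim") = false := by simp [n2]
    have b3 : (ll == "strike") = false := by simp [n3]
    have b4 : (ll == "cement") = false := by simp [n4]
    have b5 : (ll == "cemento") = false := by simp [n5]
    simp [hi, hg, List.find?, h1, h2, h3, h4, h5, b1, b2, b3, b4, b5]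

-- ===== VERDICT (by name: the statement is the Claim_ definition above) =====
theorem clean_load_value_spec : Claim_equal_clean_load_value := by
  intro load_value valid_load_types _
  unfold Spec_clean_load_value clean_load_value clean_load_value_alt
  cases load_value with
  | none => rfl
  | some s =>
    cases valid_load_types with
    | some vts =>
      by_cases hs : s = ""
      · simp [hs]
      · dsimp only
        rw [if_neg hs, if_neg hs, pvAltScan_eq]
    | none =>
      by_cases hs : s = ""
      · simp [hs]
      · dsimp only
        rw [if_neg hs, if_neg hs]
        exact pvFallback_eq (PySem.Str.lower (PySem.Str.strip s))
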